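-- pv_equiv track=rewrite | github.com/loresagaashi/cv-converter-agent | backend/apps/vector_search/services.py | _parse_competence_metadata
-- ===== SOURCE A (Python) =====
-- _CP_SKILL_SECTIONS = {
--     "soft skills",
--     "core skills",
--     "tech competencies",
--     "technical competencies",
-- }
--
-- _CP_KNOWN_SECTIONS = _CP_SKILL_SECTIONS | {
--     "name",
--     "seniority",
--     "recommendation",
--     "work experience",
--     "languages",
--     "education",
--     "training & certifications",
--     "trainings & certifications",
-- }
--
-- def _parse_competence_metadata(content: str) -> dict:
--     """
--     Extract structured metadata (skills, seniority) from competence paper content.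
--
--     Scans the CP line-by-line and only treats bullets inside the skill-carrying
--     sections as skills. Supports both single-item (`• Frontend: React`) and
--     multi-item (`• Backend: Python, Node.js`) tech-competency rows.
--     """
--     skills: list[str] = []
--     seniority = "mid"
--     current_section: str | None = None
--
--     for line in content.splitlines():
--         stripped = line.strip()
--         if not stripped:
--             continue
--
--         if stripped.lower().startswith("seniority:"):
--             raw = stripped.split(":", 1)[1].strip().lower()
--             for level in ("junior", "mid", "senior", "lead", "principal", "director"):
--                 if level in raw:
--                     seniority = level
--                     break
--             continue
--
--         # Section header detection: an unbulleted line ending with ":" whose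
--         # label matches a known CP section switches context.
--         if not stripped.startswith("•") and not stripped.startswith("-") and stripped.endswith(":"):
--             header = stripped[:-1].strip().lower()
--             if header in _CP_KNOWN_SECTIONS:
--                 current_section = header
--             else:
--                 current_section = None
--             continue
--
--         if current_section not in _CP_SKILL_SECTIONS:
--             continue
--
--         if not stripped.startswith("• "):
--             continue
--
--         body = stripped[2:].strip()
--         if not body:
--             continue
--
--         if ":" in body:
--             after_colon = body.split(":", 1)[1]
--             skills.extend(s.strip() for s in after_colon.split(",") if s.strip())
--         else:
--             if len(body) < 60:
--                 skills.append(body)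
--
--     return {
--         "seniority": seniority,
--         "skills": ", ".join(dict.fromkeys(skills)),
--     }
-- ===== SOURCE B (Python) =====
-- _CP_SKILL_SECTIONS = {
--     "soft skills",
--     "core skills",
--     "tech competencies",
--     "technical competencies",
-- }
--
-- _LEVELS = ("junior", "mid", "senior", "lead", "principal", "director")
--
--
-- def _seniority_of(lines):
--     seniority = "mid"
--     for st in lines:
--         if st.lower().startswith("seniority:"):
--             raw = st.split(":", 1)[1].strip().lower()
--             seniority = next((lv for lv in _LEVELS if lv in raw), seniority)
--     return seniority
--
--
-- def _skills_of(lines):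
--     out = []
--     section = None  # holds ONLY a skill-carrying section, else None
--     for st in lines:
--         if st.lower().startswith("seniority:"):
--             continue
--         if not st.startswith(("•", "-")) and st.endswith(":"):
--             header = st[:-1].strip().lower()
--             section = header if header in _CP_SKILL_SECTIONS else None
--             continue
--         if section is None or not st.startswith("• "):
--             continue
--         body = st[2:].strip()
--         if not body:
--             continue
--         if ":" in body:
--             out.extend(s.strip() for s in body.split(":", 1)[1].split(",") if s.strip())
--         elif len(body) < 60:
--             out.append(body)
--     return out
--
--
-- def _parse_competence_metadata(content: str) -> dict:
--     lines = [st for st in (ln.strip() for ln in content.splitlines()) if st]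
--     return {
--         "seniority": _seniority_of(lines),
--         "skills": ", ".join(dict.fromkeys(_skills_of(lines))),
--     }
-- ===== Notes on version B (the rewrite author's own statement) =====
-- stated objective: alternative
-- what changed: A's single loop threading a (skills, seniority, current_section) state is split into two independent passes over the pre-stripped non-empty lines: a seniority-only fold and a skills fold whose section state keeps only skill-carrying sections (collapsing A's known-but-non-skill section states into None).
import Mathlib
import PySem

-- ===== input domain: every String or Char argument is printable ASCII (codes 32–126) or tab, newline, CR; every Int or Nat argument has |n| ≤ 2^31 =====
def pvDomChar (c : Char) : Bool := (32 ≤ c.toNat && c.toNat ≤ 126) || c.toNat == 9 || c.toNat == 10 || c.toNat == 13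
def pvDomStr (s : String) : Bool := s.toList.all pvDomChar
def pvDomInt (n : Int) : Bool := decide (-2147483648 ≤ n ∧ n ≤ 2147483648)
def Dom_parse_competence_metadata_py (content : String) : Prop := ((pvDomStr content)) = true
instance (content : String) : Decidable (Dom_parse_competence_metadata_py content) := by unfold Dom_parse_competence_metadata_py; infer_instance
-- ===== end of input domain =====

-- B replaces A's one mode-variable loop by two independent passes over the stripped non-empty
-- lines — a seniority fold and a skills fold whose section state keeps only skill sections —
-- same values everywhere (objective: alternative decomposition, no speed claim).

-- ===== PORT A =====
def pvLevels : List String := ["junior", "mid", "senior", "lead", "principal", "director"]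

def pvSkillSections : PySem.Set String :=
  PySem.Set.ofList ["soft skills", "core skills", "tech competencies", "technical competencies"]

def pvKnownSections : PySem.Set String :=
  PySem.Set.union pvSkillSections (PySem.Set.ofList
    ["name", "seniority", "recommendation", "work experience", "languages",
     "education", "training & certifications", "trainings & certifications"])

-- s.split(":", 1)[1]  (both Pythons only evaluate it when ":" occurs in s, so the defaults are unreachable)
def pvAfterColon (s : String) : String :=
  ((PySem.Str.splitMax? s ":" 1).getD [s]).getD 1 ""

-- A's 'for level in (...): if level in raw: seniority = level; break'
def pvFindLevelA : List String → String → String → String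
  | [], _, sen => sen
  | lv :: rest, raw, sen =>
      if PySem.Str.isIn lv raw then lv else pvFindLevelA rest raw sen

-- the loop body of A, over the raw line, with state (skills, seniority, current_section)
def pvStepA (st : List String × String × Option String) (line : String) :
    List String × String × Option String :=
  let stripped := PySem.Str.strip line
  if stripped == "" then st
  else if PySem.Str.startswith (PySem.Str.lower stripped) "seniority:" then
    let raw := PySem.Str.lower (PySem.Str.strip (pvAfterColon stripped))
    (st.1, pvFindLevelA pvLevels raw st.2.1, st.2.2)
  else if !PySem.Str.startswith stripped "•" && !PySem.Str.startswith stripped "-"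
          && PySem.Str.endswith stripped ":" then
    let header := PySem.Str.lower (PySem.Str.strip (PySem.Str.slice stripped none (some (-1))))
    (st.1, st.2.1, if PySem.Set.contains pvKnownSections header then some header else none)
  else if !(match st.2.2 with
            | some h => PySem.Set.contains pvSkillSections h
            | none => false) then st
  else if !PySem.Str.startswith stripped "• " then st
  else
    let body := PySem.Str.strip (PySem.Str.slice stripped (some 2) none)
    if body == "" then st
    else if PySem.Str.isIn ":" body then
      let parts := (((PySem.Str.split? (pvAfterColon body) ",").getD []).map
                      PySem.Str.strip).filter (fun s => !(s == ""))
      (st.1 ++ parts, st.2.1, st.2.2)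
    else if PySem.Str.len body < 60 then (st.1 ++ [body], st.2.1, st.2.2)
    else st

def parse_competence_metadata_py (content : String) : List (String × String) :=
  let r := (PySem.Str.splitlines content).foldl pvStepA ([], "mid", none)
  [("seniority", r.2.1), ("skills", PySem.Str.join ", " (PySem.List.dedup r.1))]

-- ===== PORT B =====
-- B's 'next((lv for lv in _LEVELS if lv in raw), ...)'
def pvFindLevelB : List String → String → Option String
  | [], _ => none
  | lv :: rest, raw =>
      if PySem.Str.isIn lv raw then some lv else pvFindLevelB rest raw

-- one step of B's seniority-only pass (lines are already stripped and non-empty)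
def pvSenStep (sen : String) (st : String) : String :=
  if PySem.Str.startswith (PySem.Str.lower st) "seniority:" then
    (pvFindLevelB pvLevels (PySem.Str.lower (PySem.Str.strip (pvAfterColon st)))).getD sen
  else sen

-- one step of B's skills-only pass; the section state holds ONLY a skill section, else none
def pvSkillStep (st : List String × Option String) (line : String) :
    List String × Option String :=
  if PySem.Str.startswith (PySem.Str.lower line) "seniority:" then st
  else if !PySem.Str.startswith line "•" && !PySem.Str.startswith line "-"
          && PySem.Str.endswith line ":" then
    let header := PySem.Str.lower (PySem.Str.strip (PySem.Str.slice line none (some (-1))))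
    (st.1, if PySem.Set.contains pvSkillSections header then some header else none)
  else if st.2.isNone || !PySem.Str.startswith line "• " then st
  else
    let body := PySem.Str.strip (PySem.Str.slice line (some 2) none)
    if body == "" then st
    else if PySem.Str.isIn ":" body then
      (st.1 ++ (((PySem.Str.split? (pvAfterColon body) ",").getD []).map
                  PySem.Str.strip).filter (fun s => !(s == "")), st.2)
    else if PySem.Str.len body < 60 then (st.1 ++ [body], st.2)
    else st

def parse_competence_metadata_py_alt (content : String) : List (String × String) :=
  let lines := ((PySem.Str.splitlines content).map PySem.Str.strip).filter (fun s => !(s == ""))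
  [("seniority", lines.foldl pvSenStep "mid"),
   ("skills", PySem.Str.join ", " (PySem.List.dedup (lines.foldl pvSkillStep ([], none)).1))]

-- ===== PRECONDITION & SPEC =====
def Spec_parse_competence_metadata_py (content : String) (out : List (String × String)) : Prop := out = parse_competence_metadata_py_alt content
instance (content : String) (out : List (String × String)) : Decidable (Spec_parse_competence_metadata_py content out) := by unfold Spec_parse_competence_metadata_py; infer_instance

-- ===== CLAIM (what is proved, stated in full; the proofs are below) =====
def Claim_equal_parse_competence_metadata_py : Prop := ∀ (content : String), Dom_parse_competence_metadata_py content → Spec_parse_competence_metadata_py content (parse_competence_metadata_py content)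

-- ===== LEMMAS AND PROOFS =====

-- A's section state seen through B's glasses: only a skill-carrying section survives
def pvSecF : Option String → Option String
  | some h => if PySem.Set.contains pvSkillSections h then some h else none
  | none => none

-- the stripped non-empty lines B works on
def pvFL (ls : List String) : List String :=
  (ls.map PySem.Str.strip).filter (fun s => !(s == ""))

theorem pvFindLevel_eq (ls : List String) (raw sen : String) :
    pvFindLevelA ls raw sen = (pvFindLevelB ls raw).getD sen := by
  induction ls with
  | nil => rfl
  | cons lv rest ih =>
      simp only [pvFindLevelA, pvFindLevelB]
      split <;> simp [ih]

theorem pvSkill_sub (h : String) (hh : PySem.Set.contains pvSkillSections h = true) :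
    PySem.Set.contains pvKnownSections h = true := by
  have e1 : pvSkillSections = ["soft skills", "core skills", "tech competencies", "technical competencies"] := by decide
  have e2 : pvKnownSections = ["soft skills", "core skills", "tech competencies", "technical competencies",
      "name", "seniority", "recommendation", "work experience", "languages",
      "education", "training & certifications", "trainings & certifications"] := by decide
  rw [e1] at hh
  rw [e2]
  simp only [PySem.Set.contains_eq_listContains] at *
  simp only [List.contains_eq_mem, List.mem_cons, decide_eq_true_eq] at *
  tauto

theorem pvMain (ls : List String) (sk : List String) (sen : String) (sect : Option String) :
    (ls.foldl pvStepA (sk, sen, sect)).1 = ((pvFL ls).foldl pvSkillStep (sk, pvSecF sect)).1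
    ∧ (ls.foldl pvStepA (sk, sen, sect)).2.1 = (pvFL ls).foldl pvSenStep sen
    ∧ pvSecF (ls.foldl pvStepA (sk, sen, sect)).2.2 = ((pvFL ls).foldl pvSkillStep (sk, pvSecF sect)).2 := by
  induction ls generalizing sk sen sect with
  | nil => exact ⟨rfl, rfl, rfl⟩
  | cons l rest ih =>
      by_cases he : PySem.Str.strip l == ""
      · have hfl : pvFL (l :: rest) = pvFL rest := by
          simp only [pvFL, List.map_cons, List.filter_cons, he, Bool.not_true,
            Bool.false_eq_true, if_false]
        have hstep : pvStepA (sk, sen, sect) l = (sk, sen, sect) := by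
          simp only [pvStepA]; rw [if_pos he]
        simp only [List.foldl_cons, hstep, hfl]
        exact ih sk sen sect
      · have he' : (PySem.Str.strip l == "") = false := Bool.eq_false_iff.mpr he
        have hfl : pvFL (l :: rest) = PySem.Str.strip l :: pvFL rest := by
          simp only [pvFL, List.map_cons, List.filter_cons, he', Bool.not_false, if_true]
        simp only [List.foldl_cons, hfl]
        set s := PySem.Str.strip l with hs
        by_cases hsen : PySem.Str.startswith (PySem.Str.lower s) "seniority:" = true
        · have hstep : pvStepA (sk, sen, sect) l
              = (sk, pvFindLevelA pvLevels (PySem.Str.lower (PySem.Str.strip (pvAfterColon s))) sen, sect) := by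
            simp only [pvStepA, ← hs]
            rw [if_neg he, if_pos hsen]
          have hb : pvSkillStep (sk, pvSecF sect) s = (sk, pvSecF sect) := by
            simp only [pvSkillStep]; rw [if_pos hsen]
          have hsn : pvSenStep sen s
              = pvFindLevelA pvLevels (PySem.Str.strip (pvAfterColon s) |> PySem.Str.lower) sen := by
            simp only [pvSenStep]
            rw [if_pos hsen, pvFindLevel_eq]
          rw [hstep, hb, hsn]
          exact ih _ _ _
        · by_cases hhdr : (!PySem.Str.startswith s "•" && !PySem.Str.startswith s "-"
              && PySem.Str.endswith s ":") = true
          · set hd := PySem.Str.lower (PySem.Str.strip (PySem.Str.slice s none (some (-1)))) with hhd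
            have hstep : pvStepA (sk, sen, sect) l
                = (sk, sen, if PySem.Set.contains pvKnownSections hd then some hd else none) := by
              simp only [pvStepA, ← hs]
              rw [if_neg he, if_neg hsen, if_pos hhdr]
            have hb : pvSkillStep (sk, pvSecF sect) s
                = (sk, if PySem.Set.contains pvSkillSections hd then some hd else none) := by
              simp only [pvSkillStep]
              rw [if_neg hsen, if_pos hhdr]
            have hsn : pvSenStep sen s = sen := by
              simp only [pvSenStep]; rw [if_neg hsen]
            have hsec : pvSecF (if PySem.Set.contains pvKnownSections hd then some hd else none)
                = if PySem.Set.contains pvSkillSections hd then some hd else none := by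
              by_cases hk : PySem.Set.contains pvKnownSections hd = true
              · rw [if_pos hk]; simp only [pvSecF]
              · have hskf : PySem.Set.contains pvSkillSections hd = false := by
                  by_contra hc
                  exact hk (pvSkill_sub hd (Bool.of_not_eq_false hc))
                rw [if_neg hk, if_neg (by rw [hskf]; exact Bool.false_ne_true)]
                rfl
            rw [hstep, hb, hsn, ← hsec]
            exact ih _ _ _
          · -- neither a seniority line nor a section header
            have hsn : pvSenStep sen s = sen := by
              simp only [pvSenStep]; rw [if_neg hsen]
            have hguard : (match sect with
                | some h => PySem.Set.contains pvSkillSections h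
                | none => false) = (pvSecF sect).isSome := by
              cases sect with
              | none => rfl
              | some h =>
                  by_cases hc : PySem.Set.contains pvSkillSections h = true
                  · show PySem.Set.contains pvSkillSections h
                        = (pvSecF (some h)).isSome
                    rw [hc, show pvSecF (some h) = some h by
                          show (if _ then _ else _) = _; rw [if_pos hc]]
                    rfl
                  · have hcf := Bool.eq_false_iff.mpr hc
                    show PySem.Set.contains pvSkillSections h
                        = (pvSecF (some h)).isSome
                    rw [hcf, show pvSecF (some h) = none by
                          show (if _ then _ else _) = _; rw [if_neg hc]]
                    rfl
            by_cases hg : (pvSecF sect).isSome = true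
            · obtain ⟨h0, hsec0⟩ := Option.isSome_iff_exists.mp hg
              have hnn : (pvSecF sect).isNone = false := by rw [hsec0]; rfl
              by_cases hbul : PySem.Str.startswith s "• " = true
              · -- a bullet inside a skill section: both append the same skills
                set body := PySem.Str.strip (PySem.Str.slice s (some 2) none) with hbody
                have hstep : pvStepA (sk, sen, sect) l
                    = (if body == "" then (sk, sen, sect)
                       else if PySem.Str.isIn ":" body then
                         (sk ++ (((PySem.Str.split? (pvAfterColon body) ",").getD []).map
                             PySem.Str.strip).filter (fun s => !(s == "")), sen, sect)
                       else if PySem.Str.len body < 60 then (sk ++ [body], sen, sect)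
                       else (sk, sen, sect)) := by
                  simp only [pvStepA, ← hs]
                  rw [if_neg he, if_neg hsen, if_neg hhdr,
                      if_neg (by rw [hguard, hg]; exact Bool.false_ne_true),
                      if_neg (by rw [hbul]; exact Bool.false_ne_true)]
                have hb : pvSkillStep (sk, pvSecF sect) s
                    = (if body == "" then (sk, pvSecF sect)
                       else if PySem.Str.isIn ":" body then
                         (sk ++ (((PySem.Str.split? (pvAfterColon body) ",").getD []).map
                             PySem.Str.strip).filter (fun s => !(s == "")), pvSecF sect)
                       else if PySem.Str.len body < 60 then (sk ++ [body], pvSecF sect)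
                       else (sk, pvSecF sect)) := by
                  simp only [pvSkillStep]
                  rw [if_neg hsen, if_neg hhdr,
                      if_neg (by rw [hnn, hbul]; exact Bool.false_ne_true)]
                rw [hstep, hb, hsn]
                by_cases h1 : (body == "") = true
                · rw [if_pos h1, if_pos h1]; exact ih _ _ _
                · rw [if_neg h1, if_neg h1]
                  by_cases h2 : PySem.Str.isIn ":" body = true
                  · rw [if_pos h2, if_pos h2]; exact ih _ _ _
                  · rw [if_neg h2, if_neg h2]
                    by_cases h3 : PySem.Str.len body < 60
                    · rw [if_pos h3, if_pos h3]; exact ih _ _ _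
                    · rw [if_neg h3, if_neg h3]; exact ih _ _ _
              · -- skill section but not a '• ' bullet: both skip
                have hbulf := Bool.eq_false_iff.mpr hbul
                have hstep : pvStepA (sk, sen, sect) l = (sk, sen, sect) := by
                  simp only [pvStepA, ← hs]
                  rw [if_neg he, if_neg hsen, if_neg hhdr,
                      if_neg (by rw [hguard, hg]; exact Bool.false_ne_true),
                      if_pos (by rw [hbulf]; rfl)]
                have hb : pvSkillStep (sk, pvSecF sect) s = (sk, pvSecF sect) := by
                  simp only [pvSkillStep]
                  rw [if_neg hsen, if_neg hhdr, if_pos (by rw [hnn, hbulf]; rfl)]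
                rw [hstep, hb, hsn]
                exact ih _ _ _
            · -- not in a skill section: both skip
              have hgf := Bool.eq_false_iff.mpr hg
              have hnn : (pvSecF sect).isNone = true := by
                rw [Option.not_isSome_iff_eq_none.mp hg]; rfl
              have hstep : pvStepA (sk, sen, sect) l = (sk, sen, sect) := by
                simp only [pvStepA, ← hs]
                rw [if_neg he, if_neg hsen, if_neg hhdr, if_pos (by rw [hguard, hgf]; rfl)]
              have hb : pvSkillStep (sk, pvSecF sect) s = (sk, pvSecF sect) := by
                simp only [pvSkillStep]
                rw [if_neg hsen, if_neg hhdr, if_pos (by rw [hnn]; rfl)]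
              rw [hstep, hb, hsn]
              exact ih _ _ _

-- ===== VERDICT (by name: the statement is the Claim_ definition above) =====
theorem parse_competence_metadata_py_spec : Claim_equal_parse_competence_metadata_py := by
  intro content _
  unfold Spec_parse_competence_metadata_py parse_competence_metadata_py parse_competence_metadata_py_alt
  obtain ⟨h1, h2, _⟩ := pvMain (PySem.Str.splitlines content) [] "mid" none
  show [("seniority", (List.foldl pvStepA ([], "mid", none) (PySem.Str.splitlines content)).2.1),
        ("skills", PySem.Str.join ", " (PySem.List.dedup
          (List.foldl pvStepA ([], "mid", none) (PySem.Str.splitlines content)).1))]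
      = [("seniority", List.foldl pvSenStep "mid" (pvFL (PySem.Str.splitlines content))),
         ("skills", PySem.Str.join ", " (PySem.List.dedup
          (List.foldl pvSkillStep ([], none) (pvFL (PySem.Str.splitlines content))).1))]
  rw [h1, h2]
  rfl
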